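-- pv_equiv track=rewrite | github.com/miliar/Code_Jam_Webscraper | solutions_python/Problem_142/723.py | genTransStrings
-- ===== SOURCE A (Python) =====
-- import itertools
--
-- def compress(s):
--     res = ''.join(c for c, _ in itertools.groupby(s))
--     return res
--
-- def mycount(s):
--     res = []
--     compressed = compress(s)
--     i = 0
--     count = 0
--     for j in range(len(s)):
--         if s[j] == compressed[i]:
--             count += 1
--         else:
--             res.append(count)
--             count = 1
--             i+=1
--     res.append(count)
--     return res
--
-- def findMaxCount(strings):
--     res = mycount(compress(strings[0]))
--     for s in strings:
--         c = mycount(s)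
--         for i in range(len(res)):
--             if res[i] < c[i]:
--                 res[i] = c[i]
--     return res
--
-- def genTrans(strings):
--     res = []
--     counts = findMaxCount(strings)
--     compressed = mycount(compress(strings[0]))
--     current = compressed
--     res.append(list(current))
--     while current != counts:
--         for i in range(len(current)):
--             if current[i] < counts[i]:
--                 current[i] = current[i] + 1
--                 for j in range(i):
--                     current[j] = 1
--                 break
--         #generate string
--         res.append(list(current))
--     return res
--
-- def genTransStrings(strings):
--     compressed = compress(strings[0])
--     counts = genTrans(strings)
--     res = []
--     for c in counts:
--         s = ""
--         for i in range(len(c)):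
--             for k in range(c[i]):
--                 s += compressed[i]
--         res.append(s)
--     return res
-- ===== SOURCE B (Python) =====
-- import itertools
--
-- def genTransStrings(strings):
--     compressed = ''.join(ch for ch, _ in itertools.groupby(strings[0]))
--     n = len(compressed)
--     if n == 0:
--         return ['']
--     runvecs = [[len(list(g)) for _, g in itertools.groupby(s)] for s in strings]
--     counts = [max([rv[i] for rv in runvecs if i < len(rv)] + [1]) for i in range(n)]
--     seqs = [[]]
--     for c in counts:
--         seqs = [t + [d] for d in range(1, c + 1) for t in seqs]
--     return [''.join(ch * k for ch, k in zip(compressed, t)) for t in seqs]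
-- ===== Notes on version B (the rewrite author's own statement) =====
-- stated objective: alternative
-- what changed: Replaces A's incremental odometer while-loop (repeatedly scanning for the lowest incrementable digit and resetting the prefix) with a cartesian-product fold that builds all run-length tuples directly, computes run lengths via one groupby-style run-length encoding instead of A's compress+index-walking mycount, and builds each string by joining ch*k over zip instead of nested character-append loops.
import Mathlib
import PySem

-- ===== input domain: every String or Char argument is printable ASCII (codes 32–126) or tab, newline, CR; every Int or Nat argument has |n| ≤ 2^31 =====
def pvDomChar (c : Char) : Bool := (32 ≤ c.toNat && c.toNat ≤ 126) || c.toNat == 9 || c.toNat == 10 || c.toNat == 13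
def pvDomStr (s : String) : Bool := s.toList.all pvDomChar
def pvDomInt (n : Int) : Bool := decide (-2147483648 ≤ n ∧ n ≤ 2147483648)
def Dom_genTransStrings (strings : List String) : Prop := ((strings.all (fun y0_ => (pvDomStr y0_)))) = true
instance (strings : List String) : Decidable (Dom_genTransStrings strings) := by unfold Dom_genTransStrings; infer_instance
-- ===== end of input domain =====

-- B replaces A's odometer while-loop by a cartesian-product fold over the run-length maxima
-- (objective: alternative, same asymptotic cost).

-- ===== PORT A =====
-- compress: ''.join(c for c, _ in itertools.groupby(s)) = first char of each adjacent run
def dedupAdj : List Char → List Char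
  | [] => []
  | [c] => [c]
  | c :: d :: t => if c = d then dedupAdj (d :: t) else c :: dedupAdj (d :: t)

-- mycount's loop over j in range(len(s)) with state (res, i, count); compressed[i] is always
-- in range in every call A makes (i tracks the current run index), so List.getD is exact there.
def mycountLoop (comp : List Char) : List Char → List Int → Nat → Int → List Int
  | [], res, _, count => res ++ [count]
  | ch :: rest, res, i, count =>
    if ch = comp.getD i ' ' then mycountLoop comp rest res i (count + 1)
    else mycountLoop comp rest (res ++ [count]) (i + 1) 1

def mycount (s : List Char) : List Int := mycountLoop (dedupAdj s) s [] 0 0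

-- 'for i in range(len(res)): if res[i] < c[i]: res[i] = c[i]'; in Python c[i] raises IndexError
-- when c is shorter than res — Pre_ excludes exactly those inputs, so getD's 0 is unreachable.
def updAt (res c : List Int) : List Int :=
  (List.range res.length).foldl
    (fun r i => if r.getD i 0 < c.getD i 0 then r.set i (c.getD i 0) else r) res

-- strings[0] on the empty list raises in Python (excluded by Pre_); headD's "" is unreachable.
def findMaxCount (strings : List String) : List Int :=
  strings.foldl (fun res s => updAt res (mycount s.toList))
    (mycount (dedupAdj (strings.headD "").toList))

-- the inner 'for i in range(len(current)): if current[i] < counts[i]: current[i] += 1;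
-- for j in range(i): current[j] = 1; break'
def stepLoop (current counts : List Int) (i : Nat) : List Int :=
  if h : i < current.length then
    if current.getD i 0 < counts.getD i 0 then
      (List.range i).foldl (fun r j => r.set j 1) (current.set i (current.getD i 0 + 1))
    else stepLoop current counts (i + 1)
  else current
  termination_by current.length - i

-- the while-loop; fuel is a termination guard only (ample under Pre_, where the loop ends)
def genLoop : Nat → List Int → List Int → List (List Int)
  | 0, _, _ => []
  | fuel + 1, counts, current =>
    if current = counts then []
    else
      let c2 := stepLoop current counts 0
      c2 :: genLoop fuel counts c2

def genTrans (strings : List String) : List (List Int) :=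
  let counts := findMaxCount strings
  let current := mycount (dedupAdj (strings.headD "").toList)
  current :: genLoop (counts.foldl (fun a c => a * c.toNat) 1 + 1) counts current

-- Python's str built by '+=' is ported through List Char with String.mk at the end (exact)
def genTransStrings (strings : List String) : List String :=
  let compressed := dedupAdj (strings.headD "").toList
  let cs := genTrans strings
  cs.foldl (fun res c =>
    res ++ [String.mk ((List.range c.length).foldl
      (fun s i => (PySem.List.pyRange 0 (c.getD i 0) 1).foldl
        (fun s _ => s ++ [compressed.getD i ' ']) s) [])]) []

-- ===== PORT B =====
-- run-length encoding: itertools.groupby with the length of each group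
def rle : List Char → List (Char × Nat)
  | [] => []
  | c :: t =>
    match rle t with
    | [] => [(c, 1)]
    | (d, k) :: r => if c = d then (d, k + 1) :: r else (c, 1) :: (d, k) :: r

def genTransStrings_alt (strings : List String) : List String :=
  let compressed := (rle (strings.headD "").toList).map Prod.fst
  let n := compressed.length
  if n = 0 then [""]
  else
    let runvecs := strings.map (fun s => (rle s.toList).map (fun p => (p.2 : Int)))
    let counts := (List.range n).map (fun i =>
      match (runvecs.filter (fun rv => i < rv.length)).map (fun rv => rv.getD i 0) ++ [(1 : Int)] with
      | [] => 1           -- unreachable: the matched list ends with [1]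
      | x :: r => r.foldl max x)
    let seqs := counts.foldl
      (fun seqs c => (PySem.List.pyRange 1 (c + 1) 1).flatMap (fun d => seqs.map (fun t => t ++ [d])))
      [([] : List Int)]
    seqs.map (fun t => String.mk ((compressed.zip t).flatMap (fun p => List.replicate p.2.toNat p.1)))

-- ===== PRECONDITION & SPEC =====
-- number of maximal runs of equal adjacent characters
def runCount : List Char → Nat
  | [] => 0
  | [_] => 1
  | a :: b :: t => (if a = b then 0 else 1) + runCount (b :: t)

-- Pre_ excludes exactly the inputs on which Python A raises IndexError: the empty list,
-- lists where some string has fewer character runs than strings[0] (mycount(s)[i] out of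
-- range in findMaxCount), and strings[0] = '' with another string nonempty (compressed[i]
-- out of range when building the strings).
def Pre_genTransStrings (strings : List String) : Prop :=
  strings ≠ [] ∧
  (if (strings.headD "").toList = [] then ∀ s ∈ strings, s.toList = []
   else ∀ s ∈ strings, runCount (strings.headD "").toList ≤ max 1 (runCount s.toList))

instance (strings : List String) : Decidable (Pre_genTransStrings strings) := by
  unfold Pre_genTransStrings; infer_instance

def pvWitness_genTransStrings : List String := ["ab", "aab"]

def Spec_genTransStrings (strings : List String) (out : List String) : Prop :=
  out = genTransStrings_alt strings
instance (strings : List String) (out : List String) : Decidable (Spec_genTransStrings strings out) := by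
  unfold Spec_genTransStrings; infer_instance

-- ===== CLAIM (what is proved, stated in full; the proofs are below) =====
def Claim_equal_genTransStrings : Prop := ∀ (strings : List String), Dom_genTransStrings strings → Pre_genTransStrings strings → Spec_genTransStrings strings (genTransStrings strings)


-- ===== LEMMAS AND PROOFS =====

-- ---- run-length encoding basics ----
theorem rle_cons_shape : ∀ (c : Char) (t : List Char), ∃ k r, rle (c :: t) = (c, k) :: r := by
  intro c t
  induction t generalizing c with
  | nil => exact ⟨1, [], rfl⟩
  | cons x t ih =>
    obtain ⟨k, r, h⟩ := ih x
    have e : rle (c :: x :: t) = match rle (x :: t) with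
      | [] => [(c, 1)]
      | (d, k) :: r => if c = d then (d, k + 1) :: r else (c, 1) :: (d, k) :: r := rfl
    by_cases hcx : c = x
    · exact ⟨k + 1, r, by rw [e, h]; dsimp only; simp [hcx]⟩
    · exact ⟨1, (x, k) :: r, by rw [e, h]; dsimp only; simp [hcx]⟩

theorem mapfst_rle : ∀ (xs : List Char), (rle xs).map Prod.fst = dedupAdj xs := by
  intro xs
  induction xs with
  | nil => rfl
  | cons c t ih =>
    cases t with
    | nil => rfl
    | cons d t' =>
      obtain ⟨k, r, h⟩ := rle_cons_shape d t'
      have e : rle (c :: d :: t') = match rle (d :: t') with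
        | [] => [(c, 1)]
        | (d, k) :: r => if c = d then (d, k + 1) :: r else (c, 1) :: (d, k) :: r := rfl
      by_cases hcd : c = d
      · rw [e, h]
        dsimp only
        rw [if_pos hcd, dedupAdj, if_pos hcd, ← ih, h]
        simp [hcd]
      · rw [e, h]
        dsimp only
        rw [if_neg hcd, dedupAdj, if_neg hcd, ← ih, h]
        simp

-- run lengths as Python ints: [len(list(g)) for _, g in groupby(s)]
def intLens (xs : List Char) : List Int := (rle xs).map (fun p => (p.2 : Int))

theorem length_intLens_dedupAdj (xs : List Char) : (intLens xs).length = (dedupAdj xs).length := by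
  rw [← mapfst_rle]; simp [intLens]

-- ---- mycount = intLens ----
-- proof-side run counter: mid-run of char c with count occurrences so far
def contLens : Int → List Char → Char → List Int
  | count, [], _ => [count]
  | count, x :: t, c => if x = c then contLens (count + 1) t c else count :: contLens 1 t x

theorem dedupAdj_cons_shape : ∀ (c : Char) (t : List Char), ∃ r, dedupAdj (c :: t) = c :: r := by
  intro c t
  induction t generalizing c with
  | nil => exact ⟨[], rfl⟩
  | cons x t ih =>
    by_cases hcx : c = x
    · obtain ⟨r, h⟩ := ih x
      subst hcx
      exact ⟨r, by simp [dedupAdj, h]⟩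
    · exact ⟨dedupAdj (x :: t), by simp [dedupAdj, hcx]⟩

theorem getD_of_drop {comp r : List Char} {i : Nat} {a : Char}
    (h : comp.drop i = a :: r) : comp.getD i ' ' = a := by
  have h2 : comp[i]? = some a := by rw [← List.head?_drop, h]; rfl
  simp [List.getD, h2]

theorem mycountLoop_go (comp : List Char) :
    ∀ (xs : List Char) (c : Char) (i : Nat) (count : Int) (res : List Int),
      comp.drop i = dedupAdj (c :: xs) →
      mycountLoop comp xs res i count = res ++ contLens count xs c := by
  intro xs
  induction xs with
  | nil => intro c i count res _; rfl
  | cons x t ih =>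
    intro c i count res hdrop
    obtain ⟨rr, hshape⟩ := dedupAdj_cons_shape c (x :: t)
    have hget : comp.getD i ' ' = c := getD_of_drop (hshape ▸ hdrop)
    by_cases hxc : x = c
    · have hstep : mycountLoop comp (x :: t) res i count = mycountLoop comp t res i (count + 1) := by
        simp only [mycountLoop]
        rw [hget, if_pos hxc]
      have hdd : dedupAdj (c :: x :: t) = dedupAdj (c :: t) := by
        have hcx : c = x := hxc.symm
        rw [dedupAdj, if_pos hcx, hxc]
      rw [hstep, ih c i (count + 1) res (by rw [hdrop, hdd])]
      simp [contLens, hxc]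
    · have hstep : mycountLoop comp (x :: t) res i count
          = mycountLoop comp t (res ++ [count]) (i + 1) 1 := by
        simp only [mycountLoop]
        rw [hget, if_neg hxc]
      have hcx : ¬ c = x := fun h => hxc h.symm
      have hshape2 : dedupAdj (c :: x :: t) = c :: dedupAdj (x :: t) := by
        rw [dedupAdj, if_neg hcx]
      have hdrop2 : comp.drop (i + 1) = dedupAdj (x :: t) := by
        rw [← List.tail_drop, hdrop, hshape2]
        rfl
      rw [hstep, ih x (i + 1) 1 (res ++ [count]) hdrop2]
      have hcl : contLens count (x :: t) c = count :: contLens 1 t x := by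
        simp only [contLens, if_neg hxc]
      rw [hcl]
      simp

theorem contLens_eq : ∀ (xs : List Char) (c : Char) (count : Int),
    contLens count xs c = (count - 1 + (intLens (c :: xs)).headD 0) :: (intLens (c :: xs)).tail := by
  intro xs
  induction xs with
  | nil => intro c count; simp [contLens, intLens, rle]
  | cons x t ih =>
    intro c count
    by_cases hxc : x = c
    · subst hxc
      obtain ⟨k, r, h⟩ := rle_cons_shape x t
      have e : rle (x :: x :: t) = match rle (x :: t) with
        | [] => [(x, 1)]
        | (d, k) :: r => if x = d then (d, k + 1) :: r else (x, 1) :: (d, k) :: r := rfl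
      have h2 : rle (x :: x :: t) = (x, k + 1) :: r := by rw [e, h]; dsimp only; simp
      have hcl : contLens count (x :: t) x = contLens (count + 1) t x := by
        simp [contLens]
      rw [hcl, ih x (count + 1)]
      unfold intLens
      rw [h, h2]
      dsimp only [List.map_cons]
      simp only [List.headD_cons, List.tail_cons]
      congr 1
      push_cast
      ring
    · obtain ⟨k', r', h'⟩ := rle_cons_shape x t
      have e : rle (c :: x :: t) = match rle (x :: t) with
        | [] => [(c, 1)]
        | (d, k) :: r => if c = d then (d, k + 1) :: r else (c, 1) :: (d, k) :: r := rfl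
      have hcx : ¬ c = x := fun h => hxc h.symm
      have h2 : rle (c :: x :: t) = (c, 1) :: (x, k') :: r' := by
        rw [e, h']; dsimp only; simp [hcx]
      have hcl : contLens count (x :: t) c = count :: contLens 1 t x := by
        simp only [contLens, if_neg hxc]
      rw [hcl, ih x 1]
      unfold intLens
      rw [h', h2]
      dsimp only [List.map_cons]
      simp only [List.headD_cons, List.tail_cons]
      congr 1
      · ring
      · congr 1
        push_cast
        ring

theorem mycount_cons_eq (c : Char) (xs : List Char) : mycount (c :: xs) = intLens (c :: xs) := by
  obtain ⟨r, hshape⟩ := dedupAdj_cons_shape c xs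
  have hget : (dedupAdj (c :: xs)).getD 0 ' ' = c := by rw [hshape]; rfl
  have h1 : mycount (c :: xs) = mycountLoop (dedupAdj (c :: xs)) xs [] 0 1 := by
    simp only [mycount, mycountLoop]
    rw [hget]
    norm_num
  rw [h1, mycountLoop_go _ xs c 0 1 [] (by simp), contLens_eq]
  obtain ⟨k, rr, h⟩ := rle_cons_shape c xs
  simp [intLens, h]

theorem mycount_nil : mycount [] = [0] := rfl

-- ---- dedupAdj has no adjacent duplicates; its runs are all 1 ----
def NoAdjDup : List Char → Prop
  | [] => True
  | [_] => True
  | a :: b :: t => a ≠ b ∧ NoAdjDup (b :: t)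

theorem dedupAdj_noAdj : ∀ (l : List Char), NoAdjDup (dedupAdj l) := by
  intro l
  induction l with
  | nil => trivial
  | cons c t ih =>
    cases t with
    | nil => trivial
    | cons d t' =>
      by_cases hcd : c = d
      · rw [dedupAdj, if_pos hcd]
        exact ih
      · rw [dedupAdj, if_neg hcd]
        obtain ⟨r, hshape⟩ := dedupAdj_cons_shape d t'
        rw [hshape]
        rw [hshape] at ih
        exact ⟨hcd, ih⟩

theorem rle_of_noAdj : ∀ (xs : List Char), NoAdjDup xs → rle xs = xs.map (fun c => (c, 1)) := by
  intro xs
  induction xs with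
  | nil => intro _; rfl
  | cons c t ih =>
    intro h
    cases t with
    | nil => rfl
    | cons d t' =>
      have hcd : c ≠ d := h.1
      have e : rle (c :: d :: t') = match rle (d :: t') with
        | [] => [(c, 1)]
        | (dd, k) :: r => if c = dd then (dd, k + 1) :: r else (c, 1) :: (dd, k) :: r := rfl
      rw [e, ih h.2]
      dsimp only [List.map_cons]
      simp [hcd]

theorem intLens_dedupAdj (l : List Char) :
    intLens (dedupAdj l) = List.replicate (dedupAdj l).length 1 := by
  rw [intLens, rle_of_noAdj _ (dedupAdj_noAdj l), List.map_map]
  simp [Function.comp_def]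

-- ---- findMaxCount: pointwise running max ----
theorem updAt_go_length (c : List Int) : ∀ (m : Nat) (r : List Int),
    ((List.range m).foldl (fun r i => if r.getD i 0 < c.getD i 0 then r.set i (c.getD i 0) else r) r).length
      = r.length := by
  intro m
  induction m with
  | zero => intro r; rfl
  | succ m ih =>
    intro r
    rw [List.range_succ, List.foldl_append, List.foldl_cons, List.foldl_nil]
    split
    · rw [List.length_set]
      exact ih r
    · exact ih r

theorem updAt_length (r c : List Int) : (updAt r c).length = r.length := updAt_go_length c _ r

theorem getD_set_ne (z : List Int) (m i : Nat) (v : Int) (h : m ≠ i) :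
    (z.set m v).getD i 0 = z.getD i 0 := by
  simp only [List.getD, List.getElem?_set]
  rw [if_neg h]

theorem getD_set_self (z : List Int) (m : Nat) (v : Int) (h : m < z.length) :
    (z.set m v).getD m 0 = v := by
  simp [List.getD, List.getElem?_set, h]

theorem updAt_go_getD (c : List Int) : ∀ (m : Nat) (r : List Int) (i : Nat), m ≤ r.length →
    ((List.range m).foldl (fun r i => if r.getD i 0 < c.getD i 0 then r.set i (c.getD i 0) else r) r).getD i 0
      = if i < m then max (r.getD i 0) (c.getD i 0) else r.getD i 0 := by
  intro m
  induction m with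
  | zero => intro r i _; simp
  | succ m ih =>
    intro r i hm
    rw [List.range_succ, List.foldl_append, List.foldl_cons, List.foldl_nil]
    set z := (List.range m).foldl (fun r i => if r.getD i 0 < c.getD i 0 then r.set i (c.getD i 0) else r) r with hz
    have hzlen : z.length = r.length := updAt_go_length c m r
    have hzm : z.getD m 0 = r.getD m 0 := by rw [hz, ih r m (by omega), if_neg (lt_irrefl m)]
    by_cases hc : z.getD m 0 < c.getD m 0
    · rw [if_pos hc]
      by_cases him : i = m
      · subst him
        rw [getD_set_self _ _ _ (by rw [hzlen]; omega), if_pos (by omega)]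
        rw [hzm] at hc
        exact (max_eq_right (le_of_lt hc)).symm
      · rw [getD_set_ne _ _ _ _ (fun h => him h.symm), hz, ih r i (by omega)]
        by_cases h2 : i < m
        · rw [if_pos h2, if_pos (by omega)]
        · rw [if_neg h2, if_neg (by omega)]
    · rw [if_neg hc]
      by_cases him : i = m
      · subst him
        rw [hzm, if_pos (by omega)]
        rw [hzm] at hc
        exact (max_eq_left (le_of_not_gt hc)).symm
      · rw [hz, ih r i (by omega)]
        by_cases h2 : i < m
        · rw [if_pos h2, if_pos (by omega)]
        · rw [if_neg h2, if_neg (by omega)]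

theorem updAt_getD (r c : List Int) (i : Nat) (hi : i < r.length) :
    (updAt r c).getD i 0 = max (r.getD i 0) (c.getD i 0) := by
  rw [updAt, updAt_go_getD c r.length r i le_rfl, if_pos hi]

theorem foldA_length (ss : List String) : ∀ (r : List Int),
    (ss.foldl (fun res s => updAt res (mycount s.toList)) r).length = r.length := by
  induction ss with
  | nil => intro r; rfl
  | cons s ss ih => intro r; rw [List.foldl_cons, ih, updAt_length]

theorem foldA_getD (ss : List String) : ∀ (r : List Int) (i : Nat), i < r.length →
    (ss.foldl (fun res s => updAt res (mycount s.toList)) r).getD i 0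
      = ss.foldl (fun a s => max a ((mycount s.toList).getD i 0)) (r.getD i 0) := by
  induction ss with
  | nil => intro r i _; rfl
  | cons s ss ih =>
    intro r i hi
    rw [List.foldl_cons, List.foldl_cons, ih _ i (by rw [updAt_length]; exact hi),
      updAt_getD r _ i hi]

-- ---- max folds ----
theorem foldl_max_pull : ∀ (l : List Int) (a b : Int),
    List.foldl max (max a b) l = max a (List.foldl max b l) := by
  intro l
  induction l with
  | nil => intro a b; rfl
  | cons x l ih =>
    intro a b
    simp only [List.foldl_cons]
    rw [max_assoc, ih]

theorem matchmax_eq (L : List Int) :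
    (match L ++ [(1 : Int)] with
     | [] => (1 : Int)
     | x :: r => r.foldl max x) = L.foldl max 1 := by
  cases L with
  | nil => rfl
  | cons x r =>
    simp only [List.cons_append]
    rw [List.foldl_append]
    simp only [List.foldl_cons, List.foldl_nil]
    have h1 : max (1 : Int) x = max x 1 := max_comm _ _
    calc max (List.foldl max x r) 1 = max 1 (List.foldl max x r) := max_comm _ _
      _ = List.foldl max (max 1 x) r := (foldl_max_pull r 1 x).symm
      _ = List.foldl max 1 (x :: r) := rfl

-- ---- the odometer loop of genTrans as an enumeration ----
-- valid odometer states: 1 ≤ t[i] ≤ counts[i] pointwise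
def OdoValid (cs t : List Int) : Prop := List.Forall₂ (fun c d => 1 ≤ d ∧ d ≤ c) cs t

-- the tail of A's enumeration starting at state t
def enumFrom : List Int → List Int → List (List Int)
  | [], _ => [[]]
  | c :: cs, t =>
    (PySem.List.pyRange (t.headD 1) (c + 1) 1).map (· :: t.tail)
      ++ (enumFrom cs t.tail).tail.flatMap
          (fun u => (PySem.List.pyRange 1 (c + 1) 1).map (· :: u))

theorem enumFrom_head : ∀ {cs t : List Int}, OdoValid cs t → enumFrom cs t = t :: (enumFrom cs t).tail := by
  intro cs t h
  induction h with
  | nil => rfl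
  | @cons c d cs' t' hrel hrest ih =>
    rw [enumFrom]
    dsimp only [List.headD_cons, List.tail_cons]
    rw [PySem.List.pyRange_one_cons (by omega : c + 1 > d)]
    simp

theorem enumFrom_self : ∀ (cs : List Int), (∀ c ∈ cs, 1 ≤ c) → enumFrom cs cs = [cs] := by
  intro cs hpos
  induction cs with
  | nil => rfl
  | cons c cs ih =>
    rw [enumFrom]
    dsimp only [List.headD_cons, List.tail_cons]
    rw [PySem.List.pyRange_one_singleton, ih (fun x hx => hpos x (List.mem_cons_of_mem c hx))]
    simp

theorem foldl_set_succ : ∀ (l : List Nat) (x : Int) (r : List Int),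
    l.foldl (fun acc j => acc.set (j + 1) (1 : Int)) (x :: r)
      = x :: l.foldl (fun acc j => acc.set j (1 : Int)) r := by
  intro l
  induction l with
  | nil => intro x r; rfl
  | cons j l ih =>
    intro x r
    rw [List.foldl_cons, List.foldl_cons, List.set_cons_succ, ih]

theorem stepLoop_shift : ∀ (fuelk i : Nat) (d c : Int) (t' cs' : List Int),
    t'.length - i ≤ fuelk →
    (∃ j, i ≤ j ∧ j < t'.length ∧ t'.getD j 0 < cs'.getD j 0) →
    stepLoop (d :: t') (c :: cs') (i + 1) = 1 :: stepLoop t' cs' i := by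
  intro fuelk
  induction fuelk with
  | zero =>
    intro i d c t' cs' hf ⟨j, hij, hjl, _⟩
    omega
  | succ fk ih =>
    intro i d c t' cs' hf hw
    obtain ⟨j, hij, hjl, hjlt⟩ := hw
    have hi : i < t'.length := by omega
    conv_lhs => rw [stepLoop]
    conv_rhs => rw [stepLoop]
    rw [dif_pos (show i + 1 < (d :: t').length by simp; omega), dif_pos hi]
    rw [List.getD_cons_succ, List.getD_cons_succ]
    by_cases hlt : t'.getD i 0 < cs'.getD i 0
    · rw [if_pos hlt, if_pos hlt]
      rw [List.set_cons_succ, List.range_succ_eq_map, List.foldl_cons, List.set_cons_zero,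
        List.foldl_map]
      exact foldl_set_succ _ _ _
    · rw [if_neg hlt, if_neg hlt]
      have hji : j ≠ i := fun h => hlt (h ▸ hjlt)
      exact ih (i + 1) d c t' cs' (by omega) ⟨j, by omega, hjl, hjlt⟩

theorem exists_lt_of_ne : ∀ {cs t : List Int}, OdoValid cs t → t ≠ cs →
    ∃ j, j < t.length ∧ t.getD j 0 < cs.getD j 0 := by
  intro cs t h
  induction h with
  | nil => intro hne; exact absurd rfl hne
  | @cons c d cs' t' hrel hrest ih =>
    intro hne
    by_cases hdc : d < c
    · exact ⟨0, by simp, by simpa using hdc⟩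
    · have hdceq : d = c := by omega
      have hne' : t' ≠ cs' := by
        intro h'; exact hne (by rw [h', hdceq])
      obtain ⟨j, hjl, hjlt⟩ := ih hne'
      exact ⟨j + 1, by simpa using hjl, by simpa [List.getD_cons_succ] using hjlt⟩

theorem stepLoop_zero_lt (d c : Int) (t' cs' : List Int) (h : d < c) :
    stepLoop (d :: t') (c :: cs') 0 = (d + 1) :: t' := by
  rw [stepLoop, dif_pos (by simp)]
  simp only [List.getD_cons_zero]
  rw [if_pos h]
  simp

theorem stepLoop_zero_eq (c : Int) (t' cs' : List Int)
    (hv : OdoValid cs' t') (hne : t' ≠ cs') :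
    stepLoop (c :: t') (c :: cs') 0 = 1 :: stepLoop t' cs' 0 := by
  rw [stepLoop, dif_pos (by simp)]
  simp only [List.getD_cons_zero]
  rw [if_neg (lt_irrefl c)]
  obtain ⟨j, hjl, hjlt⟩ := exists_lt_of_ne hv hne
  exact stepLoop_shift t'.length 0 c c t' cs' (by omega) ⟨j, by omega, hjl, hjlt⟩

theorem step_valid : ∀ {cs t : List Int}, OdoValid cs t → t ≠ cs → OdoValid cs (stepLoop t cs 0) := by
  intro cs t h
  induction h with
  | nil => intro hne; exact absurd rfl hne
  | @cons c d cs' t' hrel hrest ih =>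
    intro hne
    by_cases hdc : d < c
    · rw [stepLoop_zero_lt _ _ _ _ hdc]
      exact List.Forall₂.cons ⟨by omega, by omega⟩ hrest
    · have hdceq : d = c := by omega
      subst hdceq
      have hne' : t' ≠ cs' := fun h' => hne (by rw [h'])
      rw [stepLoop_zero_eq _ _ _ hrest hne']
      exact List.Forall₂.cons ⟨le_refl 1, by omega⟩ (ih hne')

theorem enumFrom_step : ∀ {cs t : List Int}, OdoValid cs t → t ≠ cs →
    enumFrom cs t = t :: enumFrom cs (stepLoop t cs 0) := by
  intro cs t h
  induction h with
  | nil => intro hne; exact absurd rfl hne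
  | @cons c d cs' t' hrel hrest ih =>
    intro hne
    by_cases hdc : d < c
    · rw [stepLoop_zero_lt _ _ _ _ hdc]
      rw [enumFrom, enumFrom]
      dsimp only [List.headD_cons, List.tail_cons]
      rw [PySem.List.pyRange_one_cons (by omega : c + 1 > d)]
      simp
    · have hdceq : d = c := by omega
      subst hdceq
      have hne' : t' ≠ cs' := fun h' => hne (by rw [h'])
      rw [stepLoop_zero_eq _ _ _ hrest hne']
      rw [enumFrom, enumFrom]
      dsimp only [List.headD_cons, List.tail_cons]
      rw [ih hne']
      dsimp only [List.tail_cons]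
      rw [enumFrom_head (step_valid hrest hne')]
      dsimp only [List.tail_cons]
      rw [PySem.List.pyRange_one_singleton]
      simp

-- number of further states after t
def Rem : List Int → List Int → Nat
  | c :: cs, d :: t => (c - d).toNat + c.toNat * Rem cs t
  | _, _ => 0

theorem rem_step : ∀ {cs t : List Int}, OdoValid cs t → t ≠ cs →
    Rem cs (stepLoop t cs 0) < Rem cs t := by
  intro cs t h
  induction h with
  | nil => intro hne; exact absurd rfl hne
  | @cons c d cs' t' hrel hrest ih =>
    intro hne
    by_cases hdc : d < c
    · rw [stepLoop_zero_lt _ _ _ _ hdc]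
      rw [Rem, Rem]
      have : (c - (d + 1)).toNat < (c - d).toNat := by omega
      omega
    · have hdceq : d = c := by omega
      subst hdceq
      have hne' : t' ≠ cs' := fun h' => hne (by rw [h'])
      rw [stepLoop_zero_eq _ _ _ hrest hne']
      rw [Rem, Rem]
      have h1 : Rem cs' (stepLoop t' cs' 0) < Rem cs' t' := ih hne'
      have h2 : (d - 1).toNat < d.toNat := by omega
      have h3 : d.toNat * Rem cs' (stepLoop t' cs' 0) + d.toNat ≤ d.toNat * Rem cs' t' := by
        calc d.toNat * Rem cs' (stepLoop t' cs' 0) + d.toNat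
            = d.toNat * (Rem cs' (stepLoop t' cs' 0) + 1) := by ring
          _ ≤ d.toNat * Rem cs' t' := Nat.mul_le_mul_left _ (by omega)
      omega

theorem odovalid_pos : ∀ {cs t : List Int}, OdoValid cs t → ∀ c ∈ cs, 1 ≤ c := by
  intro cs t h
  induction h with
  | nil => intro c hc; simp at hc
  | @cons c d cs' t' hrel hrest ih =>
    intro x hx
    rcases List.mem_cons.mp hx with h1 | h2
    · omega
    · exact ih x h2

theorem genLoop_eq_enumFrom : ∀ (fuel : Nat) (cs t : List Int), OdoValid cs t →
    Rem cs t < fuel → t :: genLoop fuel cs t = enumFrom cs t := by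
  intro fuel
  induction fuel with
  | zero => intro cs t _ h; omega
  | succ f ih =>
    intro cs t hv hrem
    by_cases heq : t = cs
    · subst heq
      rw [genLoop, if_pos rfl, enumFrom_self t (odovalid_pos hv)]
    · rw [genLoop, if_neg heq]
      rw [ih cs (stepLoop t cs 0) (step_valid hv heq) (by have := rem_step hv heq; omega)]
      exact (enumFrom_step hv heq).symm

-- ---- B's cartesian-product fold ----
def enumR : List Int → List (List Int)
  | [] => [[]]
  | c :: cs => (enumR cs).flatMap (fun u => (PySem.List.pyRange 1 (c + 1) 1).map (· :: u))

theorem foldB_eq_enumR_gen : ∀ (cs : List Int) (S : List (List Int)),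
    cs.foldl (fun seqs c => (PySem.List.pyRange 1 (c + 1) 1).flatMap (fun d => seqs.map (fun t => t ++ [d]))) S
      = (enumR cs).flatMap (fun u => S.map (· ++ u)) := by
  intro cs
  induction cs with
  | nil => intro S; simp [enumR]
  | cons c cs ih =>
    intro S
    rw [List.foldl_cons, ih]
    rw [enumR, List.flatMap_assoc]
    refine congrArg (fun f => List.flatMap f (enumR cs)) (funext fun v => ?_)
    dsimp only
    rw [List.map_flatMap, List.flatMap_map]
    refine congrArg (fun f => List.flatMap f (PySem.List.pyRange 1 (c + 1) 1)) (funext fun d => ?_)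
    dsimp only
    rw [List.map_map]
    refine congrArg (fun f => List.map f S) (funext fun s => ?_)
    simp

theorem foldB_eq_enumR (cs : List Int) :
    cs.foldl (fun seqs c => (PySem.List.pyRange 1 (c + 1) 1).flatMap (fun d => seqs.map (fun t => t ++ [d]))) [([] : List Int)]
      = enumR cs := by
  rw [foldB_eq_enumR_gen]
  simp

theorem enumFrom_ones : ∀ (cs : List Int), (∀ c ∈ cs, 1 ≤ c) →
    enumFrom cs (List.replicate cs.length 1) = enumR cs := by
  intro cs
  induction cs with
  | nil => intro _; rfl
  | cons c cs ih =>
    intro hpos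
    have hpos' : ∀ x ∈ cs, 1 ≤ x := fun x hx => hpos x (List.mem_cons_of_mem c hx)
    have hv : OdoValid cs (List.replicate cs.length 1) := by
      clear ih hpos
      induction cs with
      | nil => exact List.Forall₂.nil
      | cons x xs ih2 =>
        exact List.Forall₂.cons ⟨le_refl 1, hpos' x (List.mem_cons_self)⟩
          (ih2 (fun y hy => hpos' y (List.mem_cons_of_mem x hy)))
    rw [enumFrom]
    simp only [List.length_cons, List.replicate_succ, List.headD_cons, List.tail_cons]
    have hsplit : enumR cs = List.replicate cs.length 1 :: (enumFrom cs (List.replicate cs.length 1)).tail := by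
      rw [← ih hpos']
      exact enumFrom_head hv
    rw [enumR, hsplit, List.flatMap_cons]

-- ---- fuel bound ----
theorem rem_ones : ∀ (cs : List Int), (∀ c ∈ cs, 1 ≤ c) →
    Rem cs (List.replicate cs.length 1) + 1 = (cs.map Int.toNat).prod := by
  intro cs
  induction cs with
  | nil => intro _; rfl
  | cons c cs ih =>
    intro hpos
    have hpos' : ∀ x ∈ cs, 1 ≤ x := fun x hx => hpos x (List.mem_cons_of_mem c hx)
    have hc : 1 ≤ c := hpos c List.mem_cons_self
    simp only [List.length_cons, List.replicate_succ]
    rw [Rem, List.map_cons, List.prod_cons]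
    have h1 := ih hpos'
    have h2 : (c - 1).toNat + 1 = c.toNat := by omega
    calc (c - 1).toNat + c.toNat * Rem cs (List.replicate cs.length 1) + 1
        = c.toNat * (Rem cs (List.replicate cs.length 1) + 1) := by
          rw [Nat.mul_add, Nat.mul_one]; omega
      _ = c.toNat * (cs.map Int.toNat).prod := by rw [h1]

theorem foldl_mul_toNat : ∀ (cs : List Int) (a : Nat),
    cs.foldl (fun a c => a * c.toNat) a = a * (cs.map Int.toNat).prod := by
  intro cs
  induction cs with
  | nil => intro a; simp
  | cons c cs ih => intro a; rw [List.foldl_cons, ih, List.map_cons, List.prod_cons]; ring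

-- ---- string building ----
theorem foldl_append_char : ∀ {α : Type} (L : List α) (s : List Char) (ch : Char),
    L.foldl (fun s _ => s ++ [ch]) s = s ++ List.replicate L.length ch := by
  intro α L
  induction L with
  | nil => intro s ch; simp
  | cons x L ih =>
    intro s ch
    rw [List.foldl_cons, ih, List.length_cons, List.append_assoc]
    simp [List.replicate_succ]

theorem range_flatMap_zip : ∀ (t : List Int) (comp : List Char), t.length = comp.length →
    (List.range t.length).flatMap (fun i => List.replicate (t.getD i 0).toNat (comp.getD i ' '))
      = (comp.zip t).flatMap (fun p => List.replicate p.2.toNat p.1) := by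
  intro t
  induction t with
  | nil => intro comp _; simp
  | cons v t ih =>
    intro comp hlen
    obtain ⟨ch, comp', rfl⟩ : ∃ ch comp', comp = ch :: comp' := by
      cases comp with
      | nil => simp at hlen
      | cons a b => exact ⟨a, b, rfl⟩
    rw [List.length_cons, List.range_succ_eq_map, List.flatMap_cons, List.flatMap_map]
    simp only [List.getD_cons_zero]
    rw [List.zip_cons_cons, List.flatMap_cons]
    congr 1
    rw [← ih comp' (by simpa using hlen)]
    refine congrArg (fun f => List.flatMap f (List.range t.length)) (funext fun i => ?_)
    simp [Function.comp, List.getD_cons_succ]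

theorem buildA_eq (t : List Int) (comp : List Char) (hlen : t.length = comp.length) :
    (List.range t.length).foldl
      (fun s i => (PySem.List.pyRange 0 (t.getD i 0) 1).foldl (fun s _ => s ++ [comp.getD i ' ']) s) []
      = (comp.zip t).flatMap (fun p => List.replicate p.2.toNat p.1) := by
  have hbody : ∀ (s : List Char) (i : Nat), i ∈ List.range t.length →
      (PySem.List.pyRange 0 (t.getD i 0) 1).foldl (fun s _ => s ++ [comp.getD i ' ']) s
        = s ++ List.replicate (t.getD i 0).toNat (comp.getD i ' ') := by
    intro s i _
    rw [foldl_append_char]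
    have hle : (PySem.List.pyRange 0 (t.getD i 0) 1).length = (t.getD i 0).toNat := by
      rw [PySem.List.length_pyRange_one]
      omega
    rw [hle]
  have h1 : (List.range t.length).foldl
      (fun s i => (PySem.List.pyRange 0 (t.getD i 0) 1).foldl (fun s _ => s ++ [comp.getD i ' ']) s) []
      = (List.range t.length).foldl
        (fun s i => s ++ List.replicate (t.getD i 0).toNat (comp.getD i ' ')) [] :=
    PySem.List.foldl_congr_mem _ _ _ _ hbody
  rw [h1, PySem.List.foldl_append_eq_flatMap, List.nil_append, range_flatMap_zip t comp hlen]

theorem enumR_mem_length : ∀ (cs : List Int) (t : List Int), t ∈ enumR cs → t.length = cs.length := by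
  intro cs
  induction cs with
  | nil => intro t ht; simp [enumR] at ht; simp [ht]
  | cons c cs ih =>
    intro t ht
    rw [enumR, List.mem_flatMap] at ht
    obtain ⟨u, hu, ht2⟩ := ht
    rw [List.mem_map] at ht2
    obtain ⟨d, _, rfl⟩ := ht2
    simp [ih u hu]

-- ---- counts agreement ----
theorem runCount_pos : ∀ (c : Char) (t : List Char), 1 ≤ runCount (c :: t) := by
  intro c t
  induction t generalizing c with
  | nil => simp [runCount]
  | cons d t ih =>
    rw [runCount]
    have := ih d
    omega

theorem dedupAdj_length : ∀ (l : List Char), (dedupAdj l).length = runCount l := by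
  intro l
  induction l with
  | nil => rfl
  | cons c t ih =>
    cases t with
    | nil => rfl
    | cons d t' =>
      by_cases hcd : c = d
      · rw [dedupAdj, if_pos hcd, runCount, if_pos hcd, ih]
        omega
      · rw [dedupAdj, if_neg hcd, runCount, if_neg hcd, List.length_cons, ih]
        omega

theorem foldA_to_filtered (i : Nat) : ∀ (ss : List String) (a : Int), 1 ≤ a →
    (∀ s ∈ ss, s.toList ≠ [] → i < (intLens s.toList).length) →
    ss.foldl (fun a s => max a ((mycount s.toList).getD i 0)) a
      = ((ss.filter (fun s => decide (i < (intLens s.toList).length))).map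
          (fun s => (intLens s.toList).getD i 0)).foldl max a := by
  intro ss
  induction ss with
  | nil => intro a _ _; rfl
  | cons s ss ih =>
    intro a ha hlen
    rw [List.foldl_cons]
    by_cases hs : s.toList = []
    · have h0 : (mycount s.toList).getD i 0 = 0 := by
        rw [hs, mycount_nil]
        cases i with
        | zero => rfl
        | succ j => rfl
      have hfil : (i < (intLens s.toList).length) = False := by
        rw [hs]
        simp [intLens, rle]
      rw [h0, max_eq_left (by omega), List.filter_cons, if_neg (by simp [hfil])]
      exact ih a ha (fun x hx => hlen x (List.mem_cons_of_mem s hx))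
    · have hkeep : i < (intLens s.toList).length := hlen s List.mem_cons_self hs
      obtain ⟨c0, xs, hsl⟩ := List.exists_cons_of_ne_nil hs
      have hmc : mycount s.toList = intLens s.toList := by rw [hsl, mycount_cons_eq]
      rw [hmc, List.filter_cons, if_pos (by simpa using hkeep), List.map_cons, List.foldl_cons]
      exact ih (max a ((intLens s.toList).getD i 0)) (le_trans ha (le_max_left _ _))
        (fun x hx => hlen x (List.mem_cons_of_mem s hx))

-- ---- the all-empty-strings case ----
theorem foldA_allempty : ∀ (ss : List String), (∀ s ∈ ss, s.toList = []) →
    ss.foldl (fun res s => updAt res (mycount s.toList)) [0] = [0] := by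
  intro ss
  induction ss with
  | nil => intro _; rfl
  | cons s ss ih =>
    intro h
    rw [List.foldl_cons, h s List.mem_cons_self]
    have : updAt [0] (mycount []) = [0] := by decide
    rw [this]
    exact ih (fun x hx => h x (List.mem_cons_of_mem s hx))


-- ===== VERDICT (by name: the statement is the Claim_ definition above) =====
theorem genTransStrings_spec : Claim_equal_genTransStrings := by
  unfold Claim_equal_genTransStrings
  intro strings hdom hpre
  unfold Spec_genTransStrings
  obtain ⟨hne, hcond⟩ := hpre
  obtain ⟨s0, rest, rfl⟩ := List.exists_cons_of_ne_nil hne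
  rw [List.headD_cons] at hcond
  by_cases hl : s0.toList = []
  · -- all strings are empty: both sides are [""]
    rw [if_pos hl] at hcond
    have hA0 : findMaxCount (s0 :: rest) = [0] := by
      unfold findMaxCount
      rw [List.headD_cons, hl]
      exact foldA_allempty _ hcond
    have hG : genTrans (s0 :: rest) = [[0]] := by
      unfold genTrans
      dsimp only
      rw [hA0, List.headD_cons, hl]
      rfl
    have hAfull : genTransStrings (s0 :: rest) = [""] := by
      unfold genTransStrings
      dsimp only
      rw [hG, List.headD_cons, hl]
      rfl
    have hBfull : genTransStrings_alt (s0 :: rest) = [""] := by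
      unfold genTransStrings_alt
      dsimp only
      rw [List.headD_cons, hl]
      rfl
    rw [hAfull, hBfull]
  · -- main case
    rw [if_neg hl] at hcond
    obtain ⟨c0, xs0, hl0⟩ := List.exists_cons_of_ne_nil hl
    obtain ⟨rr, hsh⟩ : ∃ rr, dedupAdj s0.toList = c0 :: rr := by
      rw [hl0]; exact dedupAdj_cons_shape c0 xs0
    have hbase : mycount (dedupAdj s0.toList) = List.replicate (dedupAdj s0.toList).length 1 := by
      rw [hsh, mycount_cons_eq, ← hsh, intLens_dedupAdj]
    have hlen_all : ∀ s ∈ s0 :: rest, s.toList ≠ [] → ∀ i, i < (dedupAdj s0.toList).length →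
        i < (intLens s.toList).length := by
      intro s hs hsne i hi
      have h1 : (intLens s.toList).length = runCount s.toList := by
        rw [length_intLens_dedupAdj, dedupAdj_length]
      obtain ⟨cc, tt, hst⟩ := List.exists_cons_of_ne_nil hsne
      have h2 : 1 ≤ runCount s.toList := by rw [hst]; exact runCount_pos _ _
      have h3 := hcond s hs
      rw [max_eq_right h2] at h3
      have h4 := dedupAdj_length s0.toList
      omega
    have hcAlen : (findMaxCount (s0 :: rest)).length = (dedupAdj s0.toList).length := by
      unfold findMaxCount
      rw [List.headD_cons, foldA_length, hbase, List.length_replicate]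
    have hcAgetD : ∀ i, i < (dedupAdj s0.toList).length →
        (findMaxCount (s0 :: rest)).getD i 0
          = (s0 :: rest).foldl (fun a s => max a ((mycount s.toList).getD i 0)) 1 := by
      intro i hi
      unfold findMaxCount
      rw [List.headD_cons, foldA_getD _ _ i (by rw [hbase, List.length_replicate]; exact hi)]
      have hone : (mycount (dedupAdj s0.toList)).getD i 0 = 1 := by
        rw [hbase]
        simp [List.getD, List.getElem?_replicate, hi]
      rw [hone]
    have hposA : ∀ c ∈ findMaxCount (s0 :: rest), 1 ≤ c := by
      intro c hc
      obtain ⟨i, hilt, hieq⟩ := List.mem_iff_getElem.mp hc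
      have hi : i < (dedupAdj s0.toList).length := by rw [← hcAlen]; exact hilt
      have := hcAgetD i hi
      rw [List.getD_eq_getElem _ 0 hilt, hieq] at this
      rw [this]
      exact (PySem.List.le_foldl_max_int (s0 :: rest) (fun s => (mycount s.toList).getD i 0) 1).1
    have hn0 : (dedupAdj s0.toList).length ≠ 0 := by rw [hsh]; simp
    -- the counts lists of A and B coincide
    have hcB : (List.range (dedupAdj s0.toList).length).map (fun i =>
        match ((((s0 :: rest).map (fun s => (rle s.toList).map (fun p => (p.2 : Int)))).filter
            (fun rv => i < rv.length)).map (fun rv => rv.getD i 0)) ++ [(1 : Int)] with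
        | [] => 1
        | x :: r => r.foldl max x) = findMaxCount (s0 :: rest) := by
      apply List.ext_getElem
      · rw [List.length_map, List.length_range, hcAlen]
      intro i h1 h2
      rw [List.getElem_map, List.getElem_range]
      have hi : i < (dedupAdj s0.toList).length := by
        have := h1; rw [List.length_map, List.length_range] at this; exact this
      rw [matchmax_eq]
      rw [← List.getD_eq_getElem _ 0 h2, hcAgetD i hi]
      have hft := foldA_to_filtered i (s0 :: rest) 1 le_rfl
        (fun s hs hne => hlen_all s hs hne i hi)
      simp only [intLens] at hft
      rw [hft, List.filter_map, List.map_map]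
      rfl
    have hGT : genTrans (s0 :: rest) = enumR (findMaxCount (s0 :: rest)) := by
      unfold genTrans
      dsimp only
      rw [List.headD_cons, hbase]
      have hvalid : OdoValid (findMaxCount (s0 :: rest))
          (List.replicate (findMaxCount (s0 :: rest)).length 1) := by
        have : ∀ (cs : List Int), (∀ c ∈ cs, 1 ≤ c) → OdoValid cs (List.replicate cs.length 1) := by
          intro cs
          induction cs with
          | nil => intro _; exact List.Forall₂.nil
          | cons x xsl ih =>
            intro hp
            exact List.Forall₂.cons ⟨le_refl 1, hp x List.mem_cons_self⟩
              (ih (fun y hy => hp y (List.mem_cons_of_mem x hy)))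
        exact this _ hposA
      have hfuel : Rem (findMaxCount (s0 :: rest)) (List.replicate (findMaxCount (s0 :: rest)).length 1)
          < (findMaxCount (s0 :: rest)).foldl (fun a c => a * c.toNat) 1 + 1 := by
        have hr := rem_ones _ hposA
        rw [foldl_mul_toNat, one_mul]
        omega
      rw [hcAlen] at hvalid hfuel
      rw [genLoop_eq_enumFrom _ _ _ hvalid hfuel, ← hcAlen,
        enumFrom_ones _ hposA]
    -- A's result as a map over the enumeration
    have hA : genTransStrings (s0 :: rest)
        = (enumR (findMaxCount (s0 :: rest))).map (fun t => String.mk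
            (((dedupAdj s0.toList).zip t).flatMap (fun p => List.replicate p.2.toNat p.1))) := by
      unfold genTransStrings
      dsimp only
      rw [List.headD_cons, hGT, PySem.List.foldl_append_singleton_eq_map, List.nil_append]
      apply List.map_congr_left
      intro t ht
      have hlt : t.length = (dedupAdj s0.toList).length := by
        rw [enumR_mem_length _ t ht, hcAlen]
      rw [buildA_eq t (dedupAdj s0.toList) hlt]
    have hB : genTransStrings_alt (s0 :: rest)
        = (enumR (findMaxCount (s0 :: rest))).map (fun t => String.mk
            (((dedupAdj s0.toList).zip t).flatMap (fun p => List.replicate p.2.toNat p.1))) := by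
      unfold genTransStrings_alt
      dsimp only
      rw [List.headD_cons, mapfst_rle, if_neg hn0, hcB, foldB_eq_enumR]
    rw [hA, hB]
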